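-- pv_equiv track=rewrite | github.com/gwesley96/GWiki | scripts/obsidian-to-gwiki.py | convert_lists
-- ===== SOURCE A (Python) =====
-- def convert_lists(text):
--     """Convert markdown lists to lst environment"""
--     lines = text.split('\n')
--     new_lines = []
--     in_list = False
--
--     for line in lines:
--         stripped = line.strip()
--         # Handle both - and * as list markers
--         if stripped.startswith('- ') or stripped.startswith('* '):
--             if not in_list:
--                 new_lines.append('\\begin{lst}')
--                 in_list = True
--             content = stripped[2:]
--             new_lines.append(f'  \\item {content}')
--         else:
--             if in_list and stripped:
--                 # If we hit a non-empty line that isn't a list item, end the list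
--                 new_lines.append('\\end{lst}')
--                 in_list = False
--             elif in_list and not stripped:
--                 # Empty line in list - usually keeps list going or ends it?
--                 # Markdown usually allows loose lists.
--                 # Let's keep it open unless next line is strictly non-list.
--                 pass
--
--             new_lines.append(line)
--
--     if in_list:
--         new_lines.append('\\end{lst}')
--
--     return '\n'.join(new_lines)
-- ===== SOURCE B (Python) =====
-- def convert_lists(text):
--     """Convert markdown lists to lst environment"""
--     lines = text.split('\n')
--     out = []
--     i = 0
--     n = len(lines)
--     while i < n:
--         stripped = lines[i].strip()
--         if stripped.startswith('- ') or stripped.startswith('* '):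
--             out.append('\\begin{lst}')
--             # consume the whole list region: items and blank lines
--             while i < n:
--                 s = lines[i].strip()
--                 if s.startswith('- ') or s.startswith('* '):
--                     out.append('  \\item ' + s[2:])
--                 elif not s:
--                     out.append(lines[i])
--                 else:
--                     break
--                 i += 1
--             out.append('\\end{lst}')
--         else:
--             out.append(lines[i])
--             i += 1
--     return '\n'.join(out)
-- ===== Notes on version B (the rewrite author's own statement) =====
-- stated objective: alternative
-- what changed: Replaces A's single pass with an in_list boolean flag by a region-based scan: an outer loop copies non-list lines and, on meeting a list item, an inner loop consumes the whole list region (items and blank lines) between one \begin{lst}/\end{lst} pair.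
import Mathlib
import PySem

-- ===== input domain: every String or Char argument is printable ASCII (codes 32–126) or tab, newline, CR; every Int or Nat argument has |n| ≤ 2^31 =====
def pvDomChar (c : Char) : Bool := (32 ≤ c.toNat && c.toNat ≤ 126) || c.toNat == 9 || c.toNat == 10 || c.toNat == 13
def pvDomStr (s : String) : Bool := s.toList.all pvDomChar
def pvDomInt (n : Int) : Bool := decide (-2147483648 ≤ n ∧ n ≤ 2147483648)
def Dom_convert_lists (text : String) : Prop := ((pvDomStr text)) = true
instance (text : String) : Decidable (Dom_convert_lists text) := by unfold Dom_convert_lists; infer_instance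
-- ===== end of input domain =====

-- B replaces A's in_list flag with an index-style region scan: an outer pass over the
-- lines and an inner pass that consumes a whole list region (items and blank lines) at
-- once; same return value, different decomposition (objective: alternative).

-- ===== PORT A =====
-- loop body of A's for-loop: state is (new_lines, in_list)
def aStep (st : List String × Bool) (line : String) : List String × Bool :=
  let stripped := PySem.Str.strip line
  if PySem.Str.startswith stripped "- " || PySem.Str.startswith stripped "* " then
    let st1 := if !st.2 then (st.1 ++ ["\\begin{lst}"], true) else st
    let content := PySem.Str.slice stripped (some 2) none
    (st1.1 ++ ["  \\item " ++ content], true)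
  else
    if st.2 && stripped ≠ "" then
      (st.1 ++ ["\\end{lst}", line], false)
    else
      (st.1 ++ [line], st.2)

def convert_lists (text : String) : String :=
  let lines := (PySem.Str.split? text "\n").getD []
  let res := lines.foldl aStep ([], false)
  let new_lines := if res.2 then res.1 ++ ["\\end{lst}"] else res.1
  PySem.Str.join "\n" new_lines

-- ===== PORT B =====
mutual
-- outer scan: copy lines until a list item opens a region
def bOuter : List String → List String
  | [] => []
  | l :: rest =>
    let s := PySem.Str.strip l
    if PySem.Str.startswith s "- " || PySem.Str.startswith s "* " then
      "\\begin{lst}" :: bInner (l :: rest)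
    else
      l :: bOuter rest
  termination_by ls => (ls.length, 1)

-- inner scan: consume items and blank lines, close the region on exit
def bInner : List String → List String
  | [] => ["\\end{lst}"]
  | l :: rest =>
    let s := PySem.Str.strip l
    if PySem.Str.startswith s "- " || PySem.Str.startswith s "* " then
      ("  \\item " ++ PySem.Str.slice s (some 2) none) :: bInner rest
    else if s = "" then
      l :: bInner rest
    else
      "\\end{lst}" :: l :: bOuter rest
  termination_by ls => (ls.length, 0)
end

def convert_lists_alt (text : String) : String :=
  PySem.Str.join "\n" (bOuter ((PySem.Str.split? text "\n").getD []))

-- ===== PRECONDITION & SPEC =====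
def Spec_convert_lists (text : String) (out : String) : Prop := out = convert_lists_alt text
instance (text : String) (out : String) : Decidable (Spec_convert_lists text out) := by unfold Spec_convert_lists; infer_instance

-- ===== CLAIM (what is proved, stated in full; the proofs are below) =====
def Claim_equal_convert_lists : Prop := ∀ (text : String), Dom_convert_lists text → Spec_convert_lists text (convert_lists text)

-- ===== LEMMAS AND PROOFS =====

-- the trailing "if in_list then append \end{lst}" of A
def aFinish (st : List String × Bool) : List String :=
  if st.2 then st.1 ++ ["\\end{lst}"] else st.1

theorem loop_eq (ls : List String) :
    (∀ acc, aFinish (ls.foldl aStep (acc, false)) = acc ++ bOuter ls)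
    ∧ (∀ acc, aFinish (ls.foldl aStep (acc, true)) = acc ++ bInner ls) := by
  induction ls with
  | nil => simp [aFinish, bOuter, bInner]
  | cons l rest ih =>
    obtain ⟨ihF, ihT⟩ := ih
    cases hb : (PySem.Str.startswith (PySem.Str.strip l) "- "
        || PySem.Str.startswith (PySem.Str.strip l) "* ") with
    | true =>
      constructor <;> intro acc
      · rw [List.foldl_cons]
        simp only [aStep, hb, if_true, Bool.not_false, ihT]
        rw [bOuter, bInner]
        simp only [hb, if_true, List.append_assoc, List.cons_append, List.nil_append]
      · rw [List.foldl_cons]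
        simp only [aStep, hb, if_true, Bool.not_true, if_neg Bool.false_ne_true, ihT]
        rw [bInner]
        simp only [hb, if_true, List.append_assoc, List.cons_append, List.nil_append]
    | false =>
      constructor <;> intro acc
      · rw [List.foldl_cons]
        simp only [aStep, hb, Bool.false_and, if_neg Bool.false_ne_true, ihF]
        rw [bOuter]
        simp only [hb, if_neg Bool.false_ne_true, List.append_assoc, List.cons_append,
          List.nil_append]
      · rw [List.foldl_cons]
        by_cases he : PySem.Str.strip l = ""
        · simp only [aStep, hb, if_neg Bool.false_ne_true, Bool.true_and]
          simp only [he, ne_eq, not_true_eq_false, decide_false,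
            if_neg Bool.false_ne_true, ihT]
          rw [bInner]
          simp only [hb, if_neg Bool.false_ne_true, if_pos he, List.append_assoc,
            List.cons_append, List.nil_append]
        · simp only [aStep, hb, if_neg Bool.false_ne_true, Bool.true_and, ne_eq, he,
            not_false_eq_true, decide_true, if_true, ihF]
          rw [bInner]
          simp only [hb, if_neg Bool.false_ne_true, if_neg he, List.append_assoc,
            List.cons_append, List.nil_append]

-- ===== VERDICT (by name: the statement is the Claim_ definition above) =====
theorem convert_lists_spec : Claim_equal_convert_lists := by
  intro text _
  unfold Spec_convert_lists convert_lists convert_lists_alt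
  have h := (loop_eq ((PySem.Str.split? text "\n").getD [])).1 []
  simp only [aFinish] at h
  simp only [h, List.nil_append]
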